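-- pv_equiv track=rewrite | github.com/leuski-ict/reservoir-dogs | TicTacToe/Board.py | _generate_winning_combinations
-- ===== SOURCE A (Python) =====
-- def _generate_winning_combinations(size):
--     # Generate winning combinations for rows, columns, and diagonals
--     combinations = []
--
--     # Rows
--     for row in range(size):
--         combo = 0
--         for col in range(size):
--             combo |= (1 << (row * size + col))
--         combinations.append(combo)
--
--     # Columns
--     for col in range(size):
--         combo = 0
--         for row in range(size):
--             combo |= (1 << (row * size + col))
--         combinations.append(combo)
--
--     # Diagonals
--     combo = 0
--     for i in range(size):
--         combo |= (1 << (i * size + i))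
--     combinations.append(combo)
--
--     combo = 0
--     for i in range(size):
--         combo |= (1 << (i * size + (size - 1 - i)))
--     combinations.append(combo)
--
--     return combinations
-- ===== SOURCE B (Python) =====
-- def _generate_winning_combinations(size):
--     # Closed-form bitmasks: a winning row is a block of `size` ones shifted into
--     # place; a column is a fixed "every size-th bit" base mask shifted by the
--     # column index; the diagonals are strided single-bit sums.
--     rows = [((1 << size) - 1) << (r * size) for r in range(size)]
--     col_base = sum(1 << (r * size) for r in range(size))
--     cols = [col_base << c for c in range(size)]
--     main_diag = sum(1 << (i * (size + 1)) for i in range(size))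
--     anti_diag = sum(1 << ((i + 1) * (size - 1)) for i in range(size))
--     return rows + cols + [main_diag, anti_diag]
-- ===== Notes on version B (the rewrite author's own statement) =====
-- stated objective: alternative
-- what changed: Replaces the nested OR-accumulation loops with closed-form arithmetic: each row mask is a block of ones shifted into place, all column masks are one precomputed base mask shifted by the column index, and the diagonals are strided power sums.
import Mathlib
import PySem

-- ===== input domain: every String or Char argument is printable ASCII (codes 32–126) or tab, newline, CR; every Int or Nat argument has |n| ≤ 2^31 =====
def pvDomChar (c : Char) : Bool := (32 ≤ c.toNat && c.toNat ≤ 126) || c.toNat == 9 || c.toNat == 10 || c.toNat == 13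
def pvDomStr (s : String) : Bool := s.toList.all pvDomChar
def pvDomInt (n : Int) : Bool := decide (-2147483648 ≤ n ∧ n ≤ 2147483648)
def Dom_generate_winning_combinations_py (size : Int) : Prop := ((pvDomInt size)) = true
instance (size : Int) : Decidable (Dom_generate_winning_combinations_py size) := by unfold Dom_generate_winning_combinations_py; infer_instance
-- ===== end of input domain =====

-- B replaces A's nested OR-accumulation loops by closed-form shifted block/stride masks (objective: alternative, O(size) masks instead of O(size^2) single-bit ORs; speed not measured here).

-- ===== PORT A =====
-- Python's 'x << k' is '<<< (·).toNat'; every shift amount in A is produced by 'range(size)'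
-- indices and is therefore nonnegative, so '.toNat' is exact here.
def generate_winning_combinations_py (size : Int) : List Int :=
  -- combinations = []; rows loop: combinations.append(OR of row bits)
  let combinations : List Int :=
    (PySem.List.pyRange 0 size).foldl (fun acc row =>
      acc ++ [(PySem.List.pyRange 0 size).foldl
        (fun combo col => PySem.Int.bor combo ((1 : Int) <<< (row * size + col).toNat)) 0]) []
  -- columns loop
  let combinations :=
    (PySem.List.pyRange 0 size).foldl (fun acc col =>
      acc ++ [(PySem.List.pyRange 0 size).foldl
        (fun combo row => PySem.Int.bor combo ((1 : Int) <<< (row * size + col).toNat)) 0]) combinations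
  -- main diagonal
  let combinations := combinations ++
    [(PySem.List.pyRange 0 size).foldl
      (fun combo i => PySem.Int.bor combo ((1 : Int) <<< (i * size + i).toNat)) 0]
  -- anti diagonal
  let combinations := combinations ++
    [(PySem.List.pyRange 0 size).foldl
      (fun combo i => PySem.Int.bor combo ((1 : Int) <<< (i * size + (size - 1 - i)).toNat)) 0]
  combinations

-- ===== PORT B =====
-- literal transliteration of Source B (closed-form masks; 'sum' of distinct powers of two)
def generate_winning_combinations_py_alt (size : Int) : List Int :=
  let rows := (PySem.List.pyRange 0 size).map
    (fun r => (((1 : Int) <<< size.toNat) - 1) <<< (r * size).toNat)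
  let colBase := ((PySem.List.pyRange 0 size).map
    (fun r => (1 : Int) <<< (r * size).toNat)).sum
  let cols := (PySem.List.pyRange 0 size).map (fun c => colBase <<< c.toNat)
  let mainDiag := ((PySem.List.pyRange 0 size).map
    (fun i => (1 : Int) <<< (i * (size + 1)).toNat)).sum
  let antiDiag := ((PySem.List.pyRange 0 size).map
    (fun i => (1 : Int) <<< ((i + 1) * (size - 1)).toNat)).sum
  rows ++ cols ++ [mainDiag, antiDiag]

-- ===== PRECONDITION & SPEC =====
def Spec_generate_winning_combinations_py (size : Int) (out : List Int) : Prop := out = generate_winning_combinations_py_alt size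
instance (size : Int) (out : List Int) : Decidable (Spec_generate_winning_combinations_py size out) := by unfold Spec_generate_winning_combinations_py; infer_instance

-- ===== CLAIM (what is proved, stated in full; the proofs are below) =====
def Claim_equal_generate_winning_combinations_py : Prop := ∀ (size : Int), Dom_generate_winning_combinations_py size → Spec_generate_winning_combinations_py size (generate_winning_combinations_py size)

-- ===== LEMMAS AND PROOFS =====

-- sum of distinct increasing powers of two stays below the next power
lemma pv_sum_pow_lt (e : Nat → Nat) :
    ∀ n : Nat, (∀ j, j + 1 ≤ n → e j < e (j + 1)) →
      ((List.range n).map (fun j => (2 : Nat) ^ (e j))).sum < 2 ^ (e n) := by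
  intro n
  induction n with
  | zero => intro _; simp
  | succ n ih =>
    intro h
    rw [List.range_succ, List.map_append, List.sum_append]
    have h1 := ih (fun j hj => h j (by omega))
    have h2 : e n < e (n + 1) := h n (le_refl _)
    have h3 : 2 ^ (e n + 1) ≤ 2 ^ (e (n + 1)) := Nat.pow_le_pow_right (by omega) (by omega)
    have h4 : (2 : Nat) ^ (e n + 1) = 2 ^ (e n) * 2 := pow_succ 2 (e n)
    simp only [List.map_cons, List.map_nil, List.sum_cons, List.sum_nil]
    linarith

-- folding '|=' over strictly increasing powers of two is their sum
lemma pv_foldl_lor_pow (e : Nat → Nat) :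
    ∀ n : Nat, (∀ j, j + 1 < n → e j < e (j + 1)) →
      (List.range n).foldl (fun a j => a ||| 2 ^ (e j)) 0 =
        ((List.range n).map (fun j => (2 : Nat) ^ (e j))).sum := by
  intro n
  induction n with
  | zero => intro _; rfl
  | succ n ih =>
    intro h
    rw [List.range_succ, List.foldl_append, List.map_append, List.sum_append,
      ih (fun j hj => h j (by omega))]
    have hb := pv_sum_pow_lt e n (fun j hj => h j (by omega))
    simp only [List.foldl_cons, List.foldl_nil, List.map_cons, List.map_nil,
      List.sum_cons, List.sum_nil, Nat.add_zero]
    rw [Nat.lor_comm, show (2 : Nat) ^ (e n) = 2 ^ (e n) * 1 by ring,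
      ← Nat.two_pow_add_eq_or_of_lt hb]
    ring

lemma pv_foldl_bor_cast (e : Nat → Nat) (l : List Nat) :
    ∀ a : Nat, l.foldl (fun acc j => PySem.Int.bor acc ((2 : Int) ^ (e j))) ((a : Nat) : Int) =
      ((l.foldl (fun acc j => acc ||| 2 ^ (e j)) a : Nat) : Int) := by
  induction l with
  | nil => intro a; rfl
  | cons x xs ih =>
    intro a
    simp only [List.foldl_cons]
    rw [show ((2 : Int) ^ (e x)) = ((2 ^ (e x) : Nat) : Int) by push_cast; rfl,
      PySem.Int.bor_natCast, ih]

-- A's OR-accumulation loop, as an Int-valued sum of powers of two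
lemma pv_foldl_bor_shift (e : Nat → Nat) (n : Nat) (h : ∀ j, j + 1 < n → e j < e (j + 1)) :
    (List.range n).foldl (fun a j => PySem.Int.bor a ((2 : Int) ^ (e j))) 0 =
      ((List.range n).map (fun j => (2 : Int) ^ (e j))).sum := by
  rw [show (0 : Int) = ((0 : Nat) : Int) from rfl, pv_foldl_bor_cast, pv_foldl_lor_pow e n h,
    Nat.cast_list_sum, List.map_map]
  simp only [Function.comp_def, Nat.cast_pow, Nat.cast_ofNat]

lemma pv_sum_range_two_pow_int (n : Nat) :
    ((List.range n).map (fun c => (2 : Int) ^ c)).sum = 2 ^ n - 1 := by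
  induction n with
  | zero => rfl
  | succ n ih =>
    rw [List.range_succ, List.map_append, List.sum_append]
    simp only [List.map_cons, List.map_nil, List.sum_cons, List.sum_nil]
    rw [ih, pow_succ]
    ring

-- row component: OR over a contiguous block of bits = block mask shifted into place
lemma pv_row_eq (n r : Nat) :
    (List.range n).foldl
        (fun (combo : Int) (c : Nat) => PySem.Int.bor combo ((1 : Int) <<< ((r : Int) * (n : Int) + (c : Int)).toNat)) 0 =
      (((1 : Int) <<< ((n : Int)).toNat) - 1) <<< (((r : Int) * (n : Int)).toNat) := by
  have hbody : (fun (combo : Int) (c : Nat) =>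
      PySem.Int.bor combo ((1 : Int) <<< ((r : Int) * (n : Int) + (c : Int)).toNat)) =
      fun combo c => PySem.Int.bor combo ((2 : Int) ^ (r * n + c)) := by
    funext combo c
    rw [show ((r : Int) * (n : Int) + (c : Int)) = ((r * n + c : Nat) : Int) by push_cast; ring,
      Int.toNat_natCast, Int.shiftLeft_eq, one_mul]
  rw [hbody, pv_foldl_bor_shift (fun c => r * n + c) n
    (fun j _ => Nat.add_lt_add_left (by omega) _)]
  rw [show ((r : Int) * (n : Int)) = ((r * n : Nat) : Int) by push_cast; ring,
    Int.toNat_natCast, Int.toNat_natCast, Int.shiftLeft_eq, Int.shiftLeft_eq, one_mul]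
  have : (fun (c : Nat) => (2 : Int) ^ (r * n + c)) = fun c => (2 : Int) ^ c * 2 ^ (r * n) := by
    funext c; rw [pow_add]; ring
  rw [this, List.sum_map_mul_right, pv_sum_range_two_pow_int]

-- column component: OR over a strided set of bits = the stride base mask shifted by the column
lemma pv_col_eq (n c : Nat) :
    (List.range n).foldl
        (fun (combo : Int) (r : Nat) => PySem.Int.bor combo ((1 : Int) <<< ((r : Int) * (n : Int) + (c : Int)).toNat)) 0 =
      (((List.range n).map (fun (r : Nat) => (1 : Int) <<< (((r : Int) * (n : Int))).toNat)).sum) <<< ((c : Int)).toNat := by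
  have hbody : (fun (combo : Int) (r : Nat) =>
      PySem.Int.bor combo ((1 : Int) <<< ((r : Int) * (n : Int) + (c : Int)).toNat)) =
      fun combo r => PySem.Int.bor combo ((2 : Int) ^ (r * n + c)) := by
    funext combo r
    rw [show ((r : Int) * (n : Int) + (c : Int)) = ((r * n + c : Nat) : Int) by push_cast; ring,
      Int.toNat_natCast, Int.shiftLeft_eq, one_mul]
  have hmono : ∀ j, j + 1 < n → j * n + c < (j + 1) * n + c := by
    intro j hj
    have hn : 0 < n := by omega
    have := Nat.mul_lt_mul_of_pos_right (Nat.lt_succ_self j) hn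
    linarith
  rw [hbody, pv_foldl_bor_shift (fun r => r * n + c) n hmono]
  have hm : (fun (r : Nat) => (1 : Int) <<< (((r : Int) * (n : Int))).toNat) =
      fun (r : Nat) => (2 : Int) ^ (r * n) := by
    funext r
    rw [show ((r : Int) * (n : Int)) = ((r * n : Nat) : Int) by push_cast; ring,
      Int.toNat_natCast, Int.shiftLeft_eq, one_mul]
  rw [hm, Int.toNat_natCast, Int.shiftLeft_eq]
  have : (fun (r : Nat) => (2 : Int) ^ (r * n + c)) = fun r => (2 : Int) ^ (r * n) * 2 ^ c := by
    funext r; rw [pow_add]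
  rw [this, List.sum_map_mul_right]

-- main diagonal: same exponents on both sides (i*n + i = i*(n+1))
lemma pv_d1_eq (n : Nat) :
    (List.range n).foldl
        (fun (combo : Int) (i : Nat) => PySem.Int.bor combo ((1 : Int) <<< ((i : Int) * (n : Int) + (i : Int)).toNat)) 0 =
      ((List.range n).map (fun (i : Nat) => (1 : Int) <<< ((i : Int) * ((n : Int) + 1)).toNat)).sum := by
  have hbody : (fun (combo : Int) (i : Nat) =>
      PySem.Int.bor combo ((1 : Int) <<< ((i : Int) * (n : Int) + (i : Int)).toNat)) =
      fun combo i => PySem.Int.bor combo ((2 : Int) ^ (i * n + i)) := by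
    funext combo i
    rw [show ((i : Int) * (n : Int) + (i : Int)) = ((i * n + i : Nat) : Int) by push_cast; ring,
      Int.toNat_natCast, Int.shiftLeft_eq, one_mul]
  have hmono : ∀ j, j + 1 < n → j * n + j < (j + 1) * n + (j + 1) := by
    intro j hj
    have := Nat.mul_le_mul_right n (Nat.le_succ j)
    linarith
  have hb2 : (fun (i : Nat) => (1 : Int) <<< ((i : Int) * ((n : Int) + 1)).toNat) =
      fun (i : Nat) => (2 : Int) ^ (i * n + i) := by
    funext i
    rw [show ((i : Int) * ((n : Int) + 1)) = ((i * n + i : Nat) : Int) by push_cast; ring,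
      Int.toNat_natCast, Int.shiftLeft_eq, one_mul]
  rw [hbody, hb2, pv_foldl_bor_shift (fun i => i * n + i) n hmono]

-- anti diagonal: i*n + (n-1-i) = (i+1)*(n-1) as integers, so the exponents agree bitwise
lemma pv_d2_eq (n : Nat) :
    (List.range n).foldl
        (fun (combo : Int) (i : Nat) => PySem.Int.bor combo
          ((1 : Int) <<< ((i : Int) * (n : Int) + ((n : Int) - 1 - (i : Int))).toNat)) 0 =
      ((List.range n).map (fun (i : Nat) => (1 : Int) <<< (((i : Int) + 1) * ((n : Int) - 1)).toNat)).sum := by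
  have hexp : ∀ i : Nat, ((i : Int) * (n : Int) + ((n : Int) - 1 - (i : Int))) =
      (((i : Int) + 1) * ((n : Int) - 1)) := by
    intro i; ring
  have hbody : (fun (combo : Int) (i : Nat) =>
      PySem.Int.bor combo ((1 : Int) <<< ((i : Int) * (n : Int) + ((n : Int) - 1 - (i : Int))).toNat)) =
      fun (combo : Int) (i : Nat) => PySem.Int.bor combo
        ((2 : Int) ^ (((i : Int) + 1) * ((n : Int) - 1)).toNat) := by
    funext combo i
    rw [hexp i, Int.shiftLeft_eq, one_mul]
  have hmono : ∀ j, j + 1 < n →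
      ((((j : Nat) : Int) + 1) * ((n : Int) - 1)).toNat < ((((j + 1 : Nat) : Int) + 1) * ((n : Int) - 1)).toNat := by
    intro j hj
    have hn' : (2 : Int) ≤ (n : Int) := by exact_mod_cast (by omega : 2 ≤ n)
    have hlt : (((j : Nat) : Int) + 1) * ((n : Int) - 1) <
        ((((j + 1 : Nat) : Int)) + 1) * ((n : Int) - 1) := by
      push_cast
      nlinarith
    have hpos : (0 : Int) ≤ (((j : Nat) : Int) + 1) * ((n : Int) - 1) := by
      nlinarith
    generalize hA : (((j : Nat) : Int) + 1) * ((n : Int) - 1) = A at hlt hpos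
    generalize hB : ((((j + 1 : Nat) : Int)) + 1) * ((n : Int) - 1) = B at hlt
    omega
  have hb2 : (fun (i : Nat) => (1 : Int) <<< (((i : Int) + 1) * ((n : Int) - 1)).toNat) =
      fun (i : Nat) => (2 : Int) ^ (((i : Int) + 1) * ((n : Int) - 1)).toNat := by
    funext i
    rw [Int.shiftLeft_eq, one_mul]
  rw [hbody, hb2,
    pv_foldl_bor_shift (fun i : Nat => ((((i : Int)) + 1) * ((n : Int) - 1)).toNat) n hmono]

-- an empty Python range for negative stop
lemma pv_pyRange_neg (size : Int) (h : size < 0) : PySem.List.pyRange 0 size = [] := by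
  simp [PySem.List.pyRange]
  omega

-- ===== VERDICT (by name: the statement is the Claim_ definition above) =====
theorem generate_winning_combinations_py_spec : Claim_equal_generate_winning_combinations_py := by
  unfold Claim_equal_generate_winning_combinations_py
  intro size _
  unfold Spec_generate_winning_combinations_py
  rcases le_or_gt 0 size with h | h
  · obtain ⟨n, rfl⟩ : ∃ n : Nat, size = (n : Int) := ⟨size.toNat, (Int.toNat_of_nonneg h).symm⟩
    simp only [generate_winning_combinations_py, generate_winning_combinations_py_alt,
      PySem.List.pyRange_zero_natCast, List.foldl_map, List.map_map,
      PySem.List.foldl_append_singleton_eq_map, Function.comp_def, List.nil_append, List.append_assoc]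
    rw [show (fun k : Nat => (List.range n).foldl
          (fun (combo : Int) (c : Nat) => PySem.Int.bor combo ((1 : Int) <<< ((k : Int) * (n : Int) + (c : Int)).toNat)) 0) =
        (fun k : Nat => (((1 : Int) <<< ((n : Int)).toNat) - 1) <<< (((k : Int) * (n : Int)).toNat))
      from funext (fun k => pv_row_eq n k)]
    rw [show (fun k : Nat => (List.range n).foldl
          (fun (combo : Int) (r : Nat) => PySem.Int.bor combo ((1 : Int) <<< ((r : Int) * (n : Int) + (k : Int)).toNat)) 0) =
        (fun k : Nat => (((List.range n).map
            (fun r : Nat => (1 : Int) <<< (((r : Int) * (n : Int))).toNat)).sum) <<< ((k : Int)).toNat)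
      from funext (fun k => pv_col_eq n k)]
    rw [pv_d1_eq n, pv_d2_eq n]
    simp only [Int.shiftLeft_natCast_right, List.cons_append, List.nil_append]
  · rw [generate_winning_combinations_py, generate_winning_combinations_py_alt,
      pv_pyRange_neg size (by omega)]
    rfl
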